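-- pv_equiv track=rewrite | github.com/almatsy159/collatz | test_formula_syr.py | get_odd_and_pow_of_2
-- ===== SOURCE A (Python) =====
-- def get_odd_and_pow_of_2(even):
--     if even == 0:
--         return 0,0
--     tmp = even
--     cpt = 0
--     while tmp%2 == 0:
--         tmp = tmp//2
--         cpt += 1
--     return tmp,cpt
-- ===== SOURCE B (Python) =====
-- def get_odd_and_pow_of_2(even):
--     if even == 0:
--         return 0, 0
--     cpt = (even & -even).bit_length() - 1
--     return even >> cpt, cpt
-- ===== Notes on version B (the rewrite author's own statement) =====
-- stated objective: simpler
-- what changed: Replaces the repeated-division loop by closed-form bit arithmetic: the exponent is the trailing-zero count (even & -even).bit_length() - 1 and the odd part is a single right shift.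
import Mathlib
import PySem

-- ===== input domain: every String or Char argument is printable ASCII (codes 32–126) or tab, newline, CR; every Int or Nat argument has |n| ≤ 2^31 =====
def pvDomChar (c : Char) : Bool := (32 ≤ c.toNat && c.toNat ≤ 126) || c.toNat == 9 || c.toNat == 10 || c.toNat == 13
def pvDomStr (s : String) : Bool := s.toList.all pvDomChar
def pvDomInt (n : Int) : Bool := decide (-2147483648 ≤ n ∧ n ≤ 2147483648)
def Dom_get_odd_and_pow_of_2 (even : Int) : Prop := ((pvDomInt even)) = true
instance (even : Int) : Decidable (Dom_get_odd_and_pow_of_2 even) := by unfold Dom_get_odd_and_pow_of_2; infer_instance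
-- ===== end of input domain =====

-- B replaces A's repeated-division loop by closed-form bit arithmetic (trailing-zero count via even & -even); objective: simpler.

-- ===== PORT A =====
-- A's while loop as fuel recursion; fuel = |even| always suffices for even ≠ 0 (the trailing-zero
-- count is below |even|), so the fuel-0 branch is never taken on the inputs A is called on.
def pvLoopA : Nat → Int → Int → Int × Int
  | 0, tmp, cpt => (tmp, cpt)
  | f + 1, tmp, cpt =>
    if PySem.Int.mod tmp 2 = 0 then pvLoopA f (PySem.Int.floordiv tmp 2) (cpt + 1)
    else (tmp, cpt)

def get_odd_and_pow_of_2 (even : Int) : Int × Int :=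
  if even = 0 then (0, 0) else pvLoopA even.natAbs even 0

-- ===== PORT B =====
-- Python's cpt is a nonnegative int; it is kept as a Nat for the shift and cast to Int in the result.
def get_odd_and_pow_of_2_alt (even : Int) : Int × Int :=
  if even = 0 then (0, 0)
  else
    let cpt : Nat := PySem.Int.bitLength (PySem.Int.band even (-even)) - 1
    (even >>> cpt, (cpt : Int))

-- ===== PRECONDITION & SPEC =====
def Spec_get_odd_and_pow_of_2 (even : Int) (out : Int × Int) : Prop := out = get_odd_and_pow_of_2_alt even
instance (even : Int) (out : Int × Int) : Decidable (Spec_get_odd_and_pow_of_2 even out) := by unfold Spec_get_odd_and_pow_of_2; infer_instance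

-- ===== CLAIM (what is proved, stated in full; the proofs are below) =====
def Claim_equal_get_odd_and_pow_of_2 : Prop := ∀ (even : Int), Dom_get_odd_and_pow_of_2 even → Spec_get_odd_and_pow_of_2 even (get_odd_and_pow_of_2 even)

-- ===== LEMMAS AND PROOFS =====

-- Nat bit identities behind `n & -n`.
theorem pv_land_succ (k : Nat) : (2 * k + 1) &&& (2 * k) = 2 * k := by
  apply Nat.eq_of_testBit_eq
  intro i
  cases i with
  | zero =>
    have h1 : (2 * k + 1) % 2 = 1 := by omega
    have h2 : (2 * k) % 2 = 0 := by omega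
    rw [Nat.testBit_land]
    simp [Nat.testBit_zero, h1, h2]
  | succ i =>
    have h1 : (2 * k + 1) / 2 = k := by omega
    have h2 : (2 * k) / 2 = k := by omega
    rw [Nat.testBit_land]
    simp [Nat.testBit_succ, h1, h2]

theorem pv_land_pred (k : Nat) (hk : 0 < k) :
    (2 * k) &&& (2 * k - 1) = 2 * (k &&& (k - 1)) := by
  apply Nat.eq_of_testBit_eq
  intro i
  cases i with
  | zero =>
    have h2 : (2 * k) % 2 = 0 := by omega
    have h3 : (2 * (k &&& (k - 1))) % 2 = 0 := by omega
    rw [Nat.testBit_land]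
    simp [Nat.testBit_zero, h2, h3]
  | succ i =>
    have h1 : (2 * k) / 2 = k := by omega
    have h2 : (2 * k - 1) / 2 = k - 1 := by omega
    have h3 : (2 * (k &&& (k - 1))) / 2 = k &&& (k - 1) := by omega
    rw [Nat.testBit_land]
    simp only [Nat.testBit_succ, h1, h2, h3]
    rw [Nat.testBit_land]

-- The lowest set bit of m, as Python computes it.
def pvLowbit (m : Nat) : Nat := m - (m &&& (m - 1))

theorem pvLowbit_odd (m : Nat) (h : m % 2 = 1) : pvLowbit m = 1 := by
  obtain ⟨k, rfl⟩ : ∃ k, m = 2 * k + 1 := ⟨m / 2, by omega⟩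
  unfold pvLowbit
  rw [show 2 * k + 1 - 1 = 2 * k from by omega, pv_land_succ k]
  omega

theorem pvLowbit_even (m : Nat) (h : m % 2 = 0) (hm : 0 < m) :
    pvLowbit m = 2 * pvLowbit (m / 2) := by
  obtain ⟨k, rfl⟩ : ∃ k, m = 2 * k := ⟨m / 2, by omega⟩
  have hk : 0 < k := by omega
  have h1 := pv_land_pred k hk
  have h2 : k &&& (k - 1) ≤ k := Nat.and_le_left
  have h3 : (2 * k) / 2 = k := by omega
  unfold pvLowbit
  rw [h3]
  omega

theorem pvLowbit_pos (m : Nat) (hm : 0 < m) : 0 < pvLowbit m := by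
  have : m &&& (m - 1) ≤ m - 1 := Nat.and_le_right
  unfold pvLowbit
  omega

-- Python's `n & -n` is the lowest set bit of |n|.
theorem pv_band_neg_self (n : Int) (hn : n ≠ 0) :
    PySem.Int.band n (-n) = ((pvLowbit n.natAbs : Nat) : Int) := by
  unfold PySem.Int.band pvLowbit
  rcases lt_trichotomy n 0 with h | h | h
  · have c1 : ¬ 0 ≤ n := by omega
    have c2 : (0:Int) ≤ -n := by omega
    simp only [c1, c2, if_true, if_false]
    have e1 : (-n).toNat = n.natAbs := by omega
    have e2 : (-n - 1).toNat = n.natAbs - 1 := by omega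
    rw [e1, e2]
  · omega
  · have c1 : (0:Int) ≤ n := by omega
    have c2 : ¬ (0:Int) ≤ -n := by omega
    simp only [c1, c2, if_true, if_false]
    have e1 : n.toNat = n.natAbs := by omega
    have e2 : (- -n - 1).toNat = n.natAbs - 1 := by omega
    rw [e1, e2]

theorem pv_bitLength_pos (l : Nat) (hl : 0 < l) : 0 < PySem.Int.bitLength (l : Int) := by
  rw [PySem.Int.bitLength_natCast hl]; omega

-- abbreviation for B's exponent (proof-side only)
def pvCnt (n : Int) : Nat := PySem.Int.bitLength (PySem.Int.band n (-n)) - 1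

theorem pvCnt_odd (n : Int) (h : ¬ (2 ∣ n)) : pvCnt n = 0 := by
  have hn : n ≠ 0 := by rintro rfl; exact h ⟨0, by ring⟩
  have hm : n.natAbs % 2 = 1 := by
    rcases Nat.mod_two_eq_zero_or_one n.natAbs with h2 | h2
    · exact absurd (Int.natAbs_dvd_natAbs.mp (Nat.dvd_of_mod_eq_zero h2)) h
    · exact h2
  unfold pvCnt
  rw [pv_band_neg_self n hn, pvLowbit_odd _ hm]
  decide

theorem pvCnt_even (n : Int) (hn : n ≠ 0) (h : 2 ∣ n) :
    pvCnt n = pvCnt (n / 2) + 1 := by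
  obtain ⟨n', rfl⟩ := h
  have hn' : n' ≠ 0 := by rintro rfl; simp at hn
  have hd : (2 * n') / 2 = n' := by omega
  have habs : (2 * n').natAbs = 2 * n'.natAbs := by
    simp [Int.natAbs_mul]
  have hmpos : 0 < n'.natAbs := by omega
  have heven : (2 * n').natAbs % 2 = 0 := by omega
  have harg : (2 * n').natAbs / 2 = n'.natAbs := by omega
  have hlow : pvLowbit ((2 * n').natAbs) = 2 * pvLowbit n'.natAbs := by
    rw [pvLowbit_even _ heven (by omega), harg]
  have hlpos : 0 < pvLowbit n'.natAbs := pvLowbit_pos _ hmpos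
  unfold pvCnt
  rw [hd, pv_band_neg_self _ hn, pv_band_neg_self _ hn', hlow]
  have hb : PySem.Int.bitLength ((2 * pvLowbit n'.natAbs : Nat) : Int)
      = PySem.Int.bitLength ((pvLowbit n'.natAbs : Nat) : Int) + 1 := by
    rw [PySem.Int.bitLength_natCast (by omega)]
    congr 2
    omega
  have hbp := pv_bitLength_pos _ hlpos
  omega

-- Main loop invariant: for n ≠ 0 and enough fuel, A's loop computes B's closed form.
theorem pv_main (m : Nat) : ∀ (n : Int), n ≠ 0 → n.natAbs ≤ m → ∀ (fuel : Nat) (c : Int),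
    n.natAbs ≤ fuel → pvLoopA fuel n c = (n >>> pvCnt n, c + (pvCnt n : Int)) := by
  induction m with
  | zero => intro n hn hm; omega
  | succ m ih =>
    intro n hn hm fuel c hfuel
    have hpos : 0 < n.natAbs := by omega
    cases fuel with
    | zero => omega
    | succ f =>
      by_cases hdvd : (2:Int) ∣ n
      · -- even branch: one division step, then the IH
        have hmod : PySem.Int.mod n 2 = 0 := (PySem.Int.mod_eq_zero_iff_dvd n 2).mpr hdvd
        have hfd : PySem.Int.floordiv n 2 = n / 2 :=
          PySem.Int.floordiv_eq_ediv_of_pos (by norm_num)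
        obtain ⟨n', hn'⟩ := hdvd
        have hne' : n / 2 ≠ 0 := by subst hn'; omega
        have habs : (n / 2).natAbs < n.natAbs := by subst hn'; omega
        have hrec := ih (n / 2) hne' (by omega) f (c + 1) (by omega)
        have hcnt := pvCnt_even n hn ⟨n', hn'⟩
        have hshift : n >>> (pvCnt (n / 2) + 1) = (n / 2) >>> pvCnt (n / 2) := by
          rw [Int.shiftRight_eq_div_pow, Int.shiftRight_eq_div_pow,
              Int.ediv_ediv_of_nonneg (by norm_num : (0:Int) ≤ 2)]
          congr 1
          push_cast
          ring
        simp only [pvLoopA, hmod, if_true, hfd, hrec]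
        simp only [Prod.mk.injEq]
        refine ⟨by rw [hcnt]; exact hshift.symm, by rw [hcnt]; push_cast; ring⟩
      · have hcnt := pvCnt_odd n hdvd
        simp [pvLoopA, hcnt, hdvd]

-- ===== VERDICT (by name: the statement is the Claim_ definition above) =====
theorem get_odd_and_pow_of_2_spec : Claim_equal_get_odd_and_pow_of_2 := by
  intro even _
  unfold Spec_get_odd_and_pow_of_2 get_odd_and_pow_of_2 get_odd_and_pow_of_2_alt
  by_cases h : even = 0
  · simp [h]
  · simp only [h, if_false]
    have := pv_main even.natAbs even h le_rfl even.natAbs 0 le_rfl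
    rw [this]
    simp [pvCnt]
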